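-- pv_equiv track=rewrite | github.com/jfgiraud/temmental | t.py | parse
-- ===== SOURCE A (Python) =====
-- def parse(input):
--     stack=[]
--     word=''
--     for c in input:
--         if c in ('[', ']', ',', ':', '~', '?'):
--             if word != '':
--                 stack.append(word)
--                 if len(stack)>1 and stack[-2] == '#filter':
--                     stack.append('#swap')
--             word=''
--             if c == '[':
--                 stack.append('#[')
--             elif c == ']':
--                 stack.append('#]')
--                 stack.append('#msg')
--             elif c == '?':
--                 stack.append("#?")
--             elif c == ':':
--                 stack.append('#filter')
--             continue
--         word += c
--     if word != '':
--         stack.append(word)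
--     return stack
-- ===== SOURCE B (Python) =====
-- def parse(input):
--     # Pass 1: tokenize into (word, delimiter) pairs plus a trailing word.
--     pairs = []
--     word = []
--     for c in input:
--         if c in '[],:~?':
--             pairs.append((''.join(word), c))
--             word = []
--         else:
--             word.append(c)
--     tail = ''.join(word)
--     # Pass 2: emit symbols from the token stream.
--     stack = []
--     for w, d in pairs:
--         if w:
--             stack.append(w)
--             if len(stack) > 1 and stack[-2] == '#filter':
--                 stack.append('#swap')
--         if d == '[':
--             stack.append('#[')
--         elif d == ']':
--             stack += ['#]', '#msg']
--         elif d == '?':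
--             stack.append('#?')
--         elif d == ':':
--             stack.append('#filter')
--     if tail:
--         stack.append(tail)
--     return stack
-- ===== Notes on version B (the rewrite author's own statement) =====
-- stated objective: alternative
-- what changed: A interleaves tokenization and symbol emission in one character loop that grows the current word by string concatenation; B first splits the input into (segment, delimiter) pairs plus a trailing segment using a char-list buffer joined once, then a separate loop over the token pairs emits the symbols.
import Mathlib
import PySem

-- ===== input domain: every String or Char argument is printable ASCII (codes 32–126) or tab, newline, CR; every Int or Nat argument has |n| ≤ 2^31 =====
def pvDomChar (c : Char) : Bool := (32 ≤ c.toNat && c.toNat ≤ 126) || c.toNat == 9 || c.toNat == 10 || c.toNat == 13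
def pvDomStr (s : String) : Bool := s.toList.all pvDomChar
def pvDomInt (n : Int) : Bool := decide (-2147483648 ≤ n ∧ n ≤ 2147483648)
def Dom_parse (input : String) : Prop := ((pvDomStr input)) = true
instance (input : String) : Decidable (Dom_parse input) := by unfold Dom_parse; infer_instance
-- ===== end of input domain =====

-- B replaces A's single character loop with a tokenize-then-emit pipeline (same output, different decomposition; objective: alternative).

-- ===== PORT A =====
-- one iteration of A's character loop; state = (stack, word)
def parseStep (st : List String × List Char) (c : Char) : List String × List Char :=
  if c = '[' ∨ c = ']' ∨ c = ',' ∨ c = ':' ∨ c = '~' ∨ c = '?' then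
    let stack :=
      if st.2 ≠ [] then
        let s := st.1 ++ [String.ofList st.2]
        if s.length > 1 ∧ PySem.List.pyGet? s (-2) = some "#filter" then s ++ ["#swap"] else s
      else st.1
    let stack :=
      if c = '[' then stack ++ ["#["]
      else if c = ']' then stack ++ ["#]", "#msg"]
      else if c = '?' then stack ++ ["#?"]
      else if c = ':' then stack ++ ["#filter"]
      else stack
    (stack, [])
  else (st.1, st.2 ++ [c])

def parse (input : String) : List String :=
  let st := input.toList.foldl parseStep ([], [])
  if st.2 ≠ [] then st.1 ++ [String.ofList st.2] else st.1

-- ===== PORT B =====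
-- pass 1 of Source B: split into (word, delimiter) pairs and the trailing word
def tokenizeB : List Char → List Char → List (String × Char) × String
  | [], word => ([], String.ofList word)
  | c :: rest, word =>
    if c = '[' ∨ c = ']' ∨ c = ',' ∨ c = ':' ∨ c = '~' ∨ c = '?' then
      let r := tokenizeB rest []
      ((String.ofList word, c) :: r.1, r.2)
    else tokenizeB rest (word ++ [c])

-- pass 2 of Source B: one iteration of the emission loop over the token pairs
def emitStepB (stack : List String) (p : String × Char) : List String :=
  let stack :=
    if p.1 ≠ "" then
      let s := stack ++ [p.1]
      if s.length > 1 ∧ PySem.List.pyGet? s (-2) = some "#filter" then s ++ ["#swap"] else s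
    else stack
  if p.2 = '[' then stack ++ ["#["]
  else if p.2 = ']' then stack ++ ["#]", "#msg"]
  else if p.2 = '?' then stack ++ ["#?"]
  else if p.2 = ':' then stack ++ ["#filter"]
  else stack

def parse_alt (input : String) : List String :=
  let r := tokenizeB input.toList []
  let stack := r.1.foldl emitStepB []
  if r.2 ≠ "" then stack ++ [r.2] else stack

-- ===== PRECONDITION & SPEC =====
def Spec_parse (input : String) (out : List String) : Prop := out = parse_alt input
instance (input : String) (out : List String) : Decidable (Spec_parse input out) := by unfold Spec_parse; infer_instance

-- ===== CLAIM (what is proved, stated in full; the proofs are below) =====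
def Claim_equal_parse : Prop := ∀ (input : String), Dom_parse input → Spec_parse input (parse input)

-- ===== LEMMAS AND PROOFS =====
theorem parse_main (cs : List Char) : ∀ (stack : List String) (word : List Char),
    (let st := cs.foldl parseStep (stack, word);
     if st.2 ≠ [] then st.1 ++ [String.ofList st.2] else st.1)
    = (let r := tokenizeB cs word;
       let s := r.1.foldl emitStepB stack;
       if r.2 ≠ "" then s ++ [r.2] else s) := by
  induction cs with
  | nil =>
    intro stack word
    simp [tokenizeB]
  | cons c rest ih =>
    intro stack word
    by_cases hc : c = '[' ∨ c = ']' ∨ c = ',' ∨ c = ':' ∨ c = '~' ∨ c = '?'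
    · simp only [List.foldl_cons, tokenizeB, if_pos hc, List.foldl]
      rw [ih]
      simp [parseStep, emitStepB, if_pos hc]
    · simp only [List.foldl_cons, tokenizeB, if_neg hc]
      rw [show parseStep (stack, word) c = (stack, word ++ [c]) by simp [parseStep, if_neg hc]]
      exact ih stack (word ++ [c])

-- ===== VERDICT (by name: the statement is the Claim_ definition above) =====
theorem parse_spec : Claim_equal_parse := by
  intro input _
  unfold Spec_parse parse parse_alt
  exact parse_main input.toList [] []
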